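-- pv_equiv track=rewrite | github.com/apache/beam | sdks/python/apache_beam/testing/benchmarks/nexmark/queries/query5.py | merge_accumulators
-- ===== SOURCE A (Python) =====
-- def merge_accumulators(accumulators):
--   max_list = []
--   max_count = 0
--   for (accu_list, count) in accumulators:
--     if count == max_count:
--       max_list = max_list + accu_list
--     elif count < max_count:
--       continue
--     else:
--       max_list = accu_list
--       max_count = count
--   return max_list, max_count
-- ===== SOURCE B (Python) =====
-- def merge_accumulators(accumulators):
--   accs = list(accumulators)
--   max_count = 0
--   for _, count in accs:
--     if count > max_count:
--       max_count = count
--   result = []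
--   for accu_list, count in accs:
--     if count == max_count:
--       result += accu_list
--   return result, max_count
-- ===== Notes on version B (the rewrite author's own statement) =====
-- stated objective: simpler
-- what changed: Replaces the single stateful max-or-reset-or-append pass with two plain passes: one computing the maximum count (clamped at 0), one concatenating exactly the lists whose count equals it.
import Mathlib
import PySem

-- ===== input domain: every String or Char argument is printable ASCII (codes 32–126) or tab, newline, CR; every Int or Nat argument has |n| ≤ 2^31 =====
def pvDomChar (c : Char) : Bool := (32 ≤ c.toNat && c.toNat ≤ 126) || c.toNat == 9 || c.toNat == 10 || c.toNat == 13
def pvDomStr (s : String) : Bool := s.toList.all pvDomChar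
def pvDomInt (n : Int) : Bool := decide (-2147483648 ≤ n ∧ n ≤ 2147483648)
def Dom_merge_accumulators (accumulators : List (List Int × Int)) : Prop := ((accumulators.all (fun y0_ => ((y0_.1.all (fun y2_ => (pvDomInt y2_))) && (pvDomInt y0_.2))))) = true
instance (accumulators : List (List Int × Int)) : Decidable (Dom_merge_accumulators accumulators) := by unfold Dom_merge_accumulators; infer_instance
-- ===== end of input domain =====

-- B replaces A's single stateful max-or-reset-or-append pass with two plain passes
-- (compute the max count clamped at 0, then concatenate the lists whose count equals it); objective: simpler.


-- ===== PORT A =====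
-- the loop carries (max_list, max_count), starting ([], 0); branches in Python's order
def merge_accumulators (accumulators : List (List Int × Int)) : List Int × Int :=
  accumulators.foldl
    (fun (st : List Int × Int) p =>
      if p.2 = st.2 then (st.1 ++ p.1, st.2)
      else if p.2 < st.2 then st
      else (p.1, p.2))
    ([], 0)

-- ===== PORT B =====
-- first pass: max count (clamped at 0 by the initial value); second pass: concatenate lists with that count
def merge_accumulators_alt (accumulators : List (List Int × Int)) : List Int × Int :=
  let max_count := accumulators.foldl (fun m p => if p.2 > m then p.2 else m) 0
  (accumulators.foldl (fun r p => if p.2 = max_count then r ++ p.1 else r) [], max_count)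

-- ===== PRECONDITION & SPEC =====
def Spec_merge_accumulators (accumulators : List (List Int × Int)) (out : List Int × Int) : Prop := out = merge_accumulators_alt accumulators
instance (accumulators : List (List Int × Int)) (out : List Int × Int) : Decidable (Spec_merge_accumulators accumulators out) := by unfold Spec_merge_accumulators; infer_instance

-- ===== CLAIM (what is proved, stated in full; the proofs are below) =====
def Claim_equal_merge_accumulators : Prop := ∀ (accumulators : List (List Int × Int)), Dom_merge_accumulators accumulators → Spec_merge_accumulators accumulators (merge_accumulators accumulators)

-- ===== LEMMAS AND PROOFS =====

-- B's first pass, with an arbitrary starting value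
def pvMax (l : List (List Int × Int)) (m : Int) : Int :=
  l.foldl (fun m p => if p.2 > m then p.2 else m) m

theorem pvMax_le (l : List (List Int × Int)) (m : Int) : m ≤ pvMax l m := by
  induction l generalizing m with
  | nil => simp [pvMax]
  | cons h t ih =>
    simp only [pvMax, List.foldl_cons]
    split
    · exact le_trans (by omega) (ih h.2)
    · exact ih m

-- B's second pass equals a filter-then-flatMap
theorem foldl_append_if_flatMap (c : Int) (l : List (List Int × Int)) (acc : List Int) :
    l.foldl (fun r p => if p.2 = c then r ++ p.1 else r) acc
      = acc ++ (l.filter (fun p => p.2 = c)).flatMap (·.1) := by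
  induction l generalizing acc with
  | nil => simp
  | cons h t ih =>
    simp only [List.foldl_cons, List.filter_cons]
    by_cases hc : h.2 = c
    · simp [hc, ih, List.flatMap_cons]
    · simp [hc, ih]

-- the invariant of A's loop: its state at any point, in terms of B's two passes
theorem loopA_char (l : List (List Int × Int)) (ml : List Int) (mc : Int) :
    l.foldl
      (fun (st : List Int × Int) p =>
        if p.2 = st.2 then (st.1 ++ p.1, st.2)
        else if p.2 < st.2 then st
        else (p.1, p.2)) (ml, mc)
    = ((if pvMax l mc = mc then ml else [])
         ++ (l.filter (fun p => p.2 = pvMax l mc)).flatMap (·.1), pvMax l mc) := by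
  induction l generalizing ml mc with
  | nil => simp [pvMax]
  | cons h t ih =>
    obtain ⟨al, c⟩ := h
    simp only [List.foldl_cons, List.filter_cons]
    by_cases h1 : c = mc
    · subst h1
      rw [ih]
      have hM : pvMax ((al, c) :: t) c = pvMax t c := by
        simp [pvMax]
      rw [hM]
      by_cases h2 : pvMax t c = c
      · simp [h2, List.flatMap_cons]
      · simp [h2, Ne.symm h2]
    · by_cases h3 : c < mc
      · rw [if_neg (by simpa using h1), if_pos h3, ih]
        have hM : pvMax ((al, c) :: t) mc = pvMax t mc := by
          simp [pvMax, if_neg (by omega : ¬ c > mc)]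
        rw [hM]
        have hne : ¬ c = pvMax t mc := by
          have := pvMax_le t mc; omega
        simp [hne]
      · have hgt : mc < c := by omega
        rw [if_neg (by simpa using h1), if_neg (by omega), ih]
        have hM : pvMax ((al, c) :: t) mc = pvMax t c := by
          simp [pvMax, if_pos (by omega : c > mc)]
        rw [hM]
        have hle := pvMax_le t c
        have hne : ¬ pvMax t c = mc := by omega
        rw [if_neg hne]
        by_cases h4 : pvMax t c = c
        · simp [h4, List.flatMap_cons]
        · simp [h4, Ne.symm h4]

-- ===== VERDICT (by name: the statement is the Claim_ definition above) =====
theorem merge_accumulators_spec : Claim_equal_merge_accumulators := by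
  intro accs _
  unfold Spec_merge_accumulators merge_accumulators merge_accumulators_alt
  rw [loopA_char]
  show _ = (accs.foldl (fun r p => if p.2 = pvMax accs 0 then r ++ p.1 else r) [], pvMax accs 0)
  rw [foldl_append_if_flatMap]
  simp
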